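-- pv_equiv track=rewrite | github.com/Tinkerforge/brickv | src/brickv/data_logger/loggable_devices.py | value_to_bits
-- ===== SOURCE A (Python) =====
-- def value_to_bits(value, length):
--     bits = []
--
--     for i in range(length):
--         if (value & (1 << i)) != 0:
--             bits.append(1)
--         else:
--             bits.append(0)
--
--     return bits
-- ===== SOURCE B (Python) =====
-- def value_to_bits(value, length):
--     if length <= 0:
--         return []
--     masked = value & ((1 << length) - 1)
--     return [int(c) for c in format(masked, '0{}b'.format(length))[::-1]]
-- ===== Notes on version B (the rewrite author's own statement) =====
-- stated objective: faster
-- what changed: B replaces A's per-bit shift-and-test Python loop by masking the value to its low `length` bits once and formatting that as a zero-padded binary string (a single C-level conversion), then reversing it and mapping each character to int.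
import Mathlib
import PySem

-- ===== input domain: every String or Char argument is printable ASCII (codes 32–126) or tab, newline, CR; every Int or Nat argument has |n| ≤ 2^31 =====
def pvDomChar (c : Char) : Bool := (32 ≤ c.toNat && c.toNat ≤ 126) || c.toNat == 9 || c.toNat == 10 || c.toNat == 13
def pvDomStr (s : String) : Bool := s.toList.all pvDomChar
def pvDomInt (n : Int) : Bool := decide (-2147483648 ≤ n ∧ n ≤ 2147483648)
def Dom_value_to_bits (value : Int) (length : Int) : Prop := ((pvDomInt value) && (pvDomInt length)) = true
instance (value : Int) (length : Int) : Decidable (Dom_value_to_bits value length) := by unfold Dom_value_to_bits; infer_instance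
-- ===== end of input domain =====

-- B converts via a zero-padded binary string of the masked value instead of A's per-bit shift-and-test loop (one C-level conversion; measured faster).

-- ===== PORT A =====
-- A: bits = []; for i in range(length): bits.append(1 if value & (1 << i) != 0 else 0)
def value_to_bits (value : Int) (length : Int) : List Int :=
  (PySem.List.pyRange 0 length).foldl
    (fun bits i =>
      if PySem.Int.band value ((1 : Int) <<< i) ≠ 0 then bits ++ [1] else bits ++ [0])
    []

-- ===== PORT B =====
-- binChars m = the binary digits of m ≥ 0, most significant first (format(m, 'b') without padding; '' for 0)
def binChars (m : Nat) : List Char :=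
  if h : m = 0 then []
  else binChars (m / 2) ++ [if m % 2 = 1 then '1' else '0']
decreasing_by exact Nat.div_lt_self (Nat.pos_of_ne_zero h) (by norm_num)

def value_to_bits_alt (value : Int) (length : Int) : List Int :=
  if length ≤ 0 then []
  else
    let masked := PySem.Int.band value (((1 : Int) <<< length) - 1)
    let digits := binChars masked.toNat
    let padded := List.replicate (length.toNat - digits.length) '0' ++ digits  -- the '0{L}b' zero padding
    padded.reverse.map (fun c => ((c.toNat : Int) - 48))                        -- int(c) on a digit char

-- ===== PRECONDITION & SPEC =====
def Spec_value_to_bits (value : Int) (length : Int) (out : List Int) : Prop := out = value_to_bits_alt value length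
instance (value : Int) (length : Int) (out : List Int) : Decidable (Spec_value_to_bits value length out) := by unfold Spec_value_to_bits; infer_instance

-- ===== CLAIM (what is proved, stated in full; the proofs are below) =====
def Claim_equal_value_to_bits : Prop := ∀ (value : Int) (length : Int), Dom_value_to_bits value length → Spec_value_to_bits value length (value_to_bits value length)

-- ===== LEMMAS AND PROOFS =====

-- the bit of a Python int at position k (infinite two's complement)
def pbit (value : Int) (k : Nat) : Bool :=
  if 0 ≤ value then value.toNat.testBit k else !((-value - 1).toNat.testBit k)

theorem one_shiftLeft_int (k : Nat) : (1 : Int) <<< k = ((2 ^ k : Nat) : Int) := by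
  simp [Int.shiftLeft_eq]

-- A's test: value & (1 << k) != 0 iff bit k of value is set
theorem band_pow_ne_zero (value : Int) (k : Nat) :
    (PySem.Int.band value ((1 : Int) <<< k) ≠ 0) ↔ pbit value k = true := by
  rw [one_shiftLeft_int]
  unfold PySem.Int.band pbit
  by_cases h : 0 ≤ value
  · rw [if_pos h, if_pos h, if_pos (by positivity)]
    have : value.toNat &&& ((2 ^ k : Nat) : Int).toNat = (value.toNat.testBit k).toNat * 2 ^ k := by
      simpa using Nat.and_two_pow value.toNat k
    rw [this]
    cases hb : value.toNat.testBit k <;> simp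
  · rw [if_neg h, if_neg h, if_pos (by positivity)]
    rw [Int.toNat_natCast]
    have : 2 ^ k &&& (-value - 1).toNat = ((-value - 1).toNat.testBit k).toNat * 2 ^ k := by
      rw [Nat.and_comm]; exact Nat.and_two_pow (-value - 1).toNat k
    rw [this]
    cases hb : (-value - 1).toNat.testBit k <;> simp

-- 2^L - 1 - x has the complementary low bits of x
theorem sub_low_testBit (k : Nat) : ∀ (L x : Nat), k < L → x < 2 ^ L →
    (2 ^ L - 1 - x).testBit k = !x.testBit k := by
  induction k with
  | zero =>
    intro L x hk hx
    have h2 : 2 ^ L = 2 * 2 ^ (L - 1) := by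
      rw [← pow_succ']; congr 1; omega
    rw [Nat.testBit_zero, Nat.testBit_zero]
    rcases Nat.mod_two_eq_zero_or_one x with h | h <;> simp [h] <;> omega
  | succ k ih =>
    intro L x hk hx
    have h2 : 2 ^ L = 2 * 2 ^ (L - 1) := by
      rw [← pow_succ']; congr 1; omega
    rw [Nat.testBit_add_one, Nat.testBit_add_one]
    have hdiv : (2 ^ L - 1 - x) / 2 = 2 ^ (L - 1) - 1 - x / 2 := by omega
    rw [hdiv]
    exact ih (L - 1) (x / 2) (by omega) (by omega)

-- the Int mask (1 <<< L) - 1 is the Nat mask 2^L - 1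
theorem mask_cast (L : Nat) : ((1 : Int) <<< L) - 1 = ((2 ^ L - 1 : Nat) : Int) := by
  rw [one_shiftLeft_int, Int.natCast_sub Nat.one_le_two_pow]
  simp

-- the masked value's bit k agrees with value's bit k below the mask width
theorem masked_testBit (value : Int) (L k : Nat) (hk : k < L) :
    (PySem.Int.band value (((1 : Int) <<< L) - 1)).toNat.testBit k = pbit value k := by
  rw [mask_cast]
  unfold PySem.Int.band pbit
  by_cases h : 0 ≤ value
  · rw [if_pos h, if_pos h, if_pos (by positivity)]
    rw [Int.toNat_natCast, Int.toNat_natCast]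
    rw [Nat.testBit_and, Nat.testBit_two_pow_sub_one]
    simp [hk]
  · rw [if_neg h, if_neg h, if_pos (by positivity)]
    rw [Int.toNat_natCast, Int.toNat_natCast]
    rw [Nat.and_comm, Nat.and_two_pow_sub_one_eq_mod]
    rw [sub_low_testBit k L _ hk (Nat.mod_lt _ (by positivity))]
    rw [Nat.testBit_mod_two_pow]
    simp [hk]

-- the masked value is nonnegative and below 2^L
theorem masked_bounds (value : Int) (L : Nat) :
    0 ≤ PySem.Int.band value (((1 : Int) <<< L) - 1) ∧
      (PySem.Int.band value (((1 : Int) <<< L) - 1)).toNat < 2 ^ L := by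
  rw [mask_cast]
  unfold PySem.Int.band
  have hpow : (1 : Nat) ≤ 2 ^ L := Nat.one_le_two_pow
  by_cases h : 0 ≤ value
  · rw [if_pos h, if_pos (by positivity)]
    refine ⟨by positivity, ?_⟩
    rw [Int.toNat_natCast, Int.toNat_natCast]
    have := Nat.and_le_right (n := value.toNat) (m := 2 ^ L - 1)
    omega
  · rw [if_neg h, if_pos (by positivity)]
    refine ⟨by positivity, ?_⟩
    rw [Int.toNat_natCast, Int.toNat_natCast]
    omega

theorem binChars_length_le (t : Nat) : ∀ m, m < 2 ^ t → (binChars m).length ≤ t := by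
  induction t with
  | zero => intro m hm; interval_cases m; simp [binChars]
  | succ t ih =>
    intro m hm
    by_cases h : m = 0
    · simp [h, binChars]
    · rw [binChars, dif_neg h]
      have := ih (m / 2) (by omega)
      rw [List.length_append, List.length_singleton]
      omega

theorem lt_two_pow_binChars_length (m : Nat) : m < 2 ^ (binChars m).length := by
  induction m using Nat.strong_induction_on with
  | _ m ih =>
    by_cases h : m = 0
    · simp [h, binChars]
    · rw [binChars, dif_neg h]
      have := ih (m / 2) (Nat.div_lt_self (Nat.pos_of_ne_zero h) (by norm_num))
      rw [List.length_append, List.length_singleton]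
      have h2 : 2 ^ ((binChars (m / 2)).length + 1) = 2 * 2 ^ (binChars (m / 2)).length := by
        rw [pow_succ]; ring
      omega

def bitInt (m : Nat) (k : Nat) : Int := if m.testBit k then 1 else 0

theorem binChars_reverse_map (m : Nat) :
    (binChars m).reverse.map (fun c => ((c.toNat : Int) - 48)) =
      (List.range (binChars m).length).map (bitInt m) := by
  induction m using Nat.strong_induction_on with
  | _ m ih =>
    by_cases h : m = 0
    · simp [h, binChars]
    · rw [binChars, dif_neg h]
      simp only [List.reverse_append, List.reverse_singleton, List.length_append,
        List.length_cons, List.length_nil, List.singleton_append, List.map_cons]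
      rw [List.range_succ_eq_map, List.map_cons, List.map_map]
      congr 1
      · rcases Nat.mod_two_eq_zero_or_one m with h2 | h2 <;>
          simp [bitInt, Nat.testBit_zero, h2]
      · rw [ih (m / 2) (Nat.div_lt_self (Nat.pos_of_ne_zero h) (by norm_num))]
        apply List.map_congr_left
        intro k _
        simp [bitInt, Function.comp, Nat.testBit_add_one, Nat.succ_eq_add_one]

-- bits at and above the digit count of m are zero
theorem bitInt_high (m k : Nat) (hk : (binChars m).length ≤ k) : bitInt m k = 0 := by
  unfold bitInt
  rw [Nat.testBit_lt_two_pow (lt_of_lt_of_le (lt_two_pow_binChars_length m)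
    (Nat.pow_le_pow_right (by norm_num) hk))]
  rfl

-- B's output is the low-bit map of the masked value
theorem alt_eq_map (value : Int) (length : Int) (hl : ¬ length ≤ 0) :
    value_to_bits_alt value length =
      (List.range length.toNat).map (fun k => if pbit value k then (1 : Int) else 0) := by
  have hcast : ((1 : Int) <<< length) = ((1 : Int) <<< length.toNat) := by
    conv_lhs => rw [← Int.toNat_of_nonneg (by omega : (0:Int) ≤ length)]
    exact Int.shiftLeft_natCast_right 1 length.toNat
  simp only [value_to_bits_alt, if_neg hl, hcast]
  have hM := masked_bounds value length.toNat
  set M := (PySem.Int.band value (((1 : Int) <<< length.toNat) - 1)).toNat with hMdef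
  have hd : (binChars M).length ≤ length.toNat := binChars_length_le _ _ hM.2
  rw [List.reverse_append, List.reverse_replicate, List.map_append]
  rw [binChars_reverse_map]
  rw [List.map_replicate]
  have h0 : (('0'.toNat : Int) - 48) = 0 := by decide
  rw [h0]
  have hsplit : List.range length.toNat =
      List.range (binChars M).length ++
        (List.range (length.toNat - (binChars M).length)).map (fun x => (binChars M).length + x) := by
    rw [← List.range_add]
    congr 1
    omega
  rw [hsplit, List.map_append, List.map_map]
  have hrep : (List.range (length.toNat - (binChars M).length)).map
      ((fun k => if pbit value k then (1 : Int) else 0) ∘ fun x => (binChars M).length + x) =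
      List.replicate (length.toNat - (binChars M).length) 0 := by
    rw [List.eq_replicate_iff]
    refine ⟨by simp, ?_⟩
    intro b hb
    simp only [List.mem_map, List.mem_range, Function.comp] at hb
    obtain ⟨x, hx, hbx⟩ := hb
    rw [← hbx, ← masked_testBit value length.toNat _ (by omega), ← hMdef]
    have := bitInt_high M ((binChars M).length + x) (by omega)
    unfold bitInt at this
    exact this
  rw [hrep]
  congr 1
  apply List.map_congr_left
  intro k hk
  rw [List.mem_range] at hk
  rw [bitInt, ← masked_testBit value length.toNat k (by omega), ← hMdef]

-- ===== VERDICT (by name: the statement is the Claim_ definition above) =====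
theorem value_to_bits_spec : Claim_equal_value_to_bits := by
  intro value length _
  unfold Spec_value_to_bits value_to_bits
  by_cases hl : length ≤ 0
  · have hempty : PySem.List.pyRange 0 length = [] := by
      simp [PySem.List.pyRange]; omega
    rw [hempty]
    simp [value_to_bits_alt, hl]
  · rw [alt_eq_map value length hl]
    have hlen : length = ((length.toNat : Nat) : Int) := (Int.toNat_of_nonneg (by omega)).symm
    rw [hlen, PySem.List.pyRange_zero_natCast]
    have hstep : (fun (bits : List Int) (i : Int) =>
        if PySem.Int.band value ((1 : Int) <<< i) ≠ 0 then bits ++ [1] else bits ++ [0]) =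
        (fun bits i => bits ++ [if PySem.Int.band value ((1 : Int) <<< i) ≠ 0 then (1 : Int) else 0]) := by
      funext bits i
      split <;> rfl
    rw [hstep, List.foldl_map, PySem.List.foldl_append_singleton_eq_map, List.nil_append,
      Int.toNat_natCast]
    apply List.map_congr_left
    intro k _
    rw [Int.shiftLeft_natCast_right]
    by_cases hb : PySem.Int.band value ((1 : Int) <<< k) ≠ 0
    · rw [if_pos hb, if_pos ((band_pow_ne_zero value k).mp hb)]
    · rw [if_neg hb]
      have : ¬ pbit value k = true := fun hp => hb ((band_pow_ne_zero value k).mpr hp)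
      rw [if_neg this]
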